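-- pv_equiv track=rewrite | github.com/anupriyomandal/ceat_2w_recommender | backend/core/data_loader.py | get_models_for_brand
-- ===== SOURCE A (Python) =====
-- from typing import List, Dict, Tuple
--
-- def get_models_for_brand(records: List[Dict], brand: str) -> List[str]:
--     seen = set()
--     result = []
--     for r in records:
--         if r["vehicle_brand"].lower() == brand.lower() and r["vehicle_model"] not in seen:
--             seen.add(r["vehicle_model"])
--             result.append(r["vehicle_model"])
--     return sorted(result)
-- ===== SOURCE B (Python) =====
-- def get_models_for_brand(records, brand):
--     target = brand.lower()
--     models = sorted(r["vehicle_model"] for r in records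
--                     if r["vehicle_brand"].lower() == target)
--     out = []
--     for m in models:
--         if not out or out[-1] != m:
--             out.append(m)
--     return out
-- ===== Notes on version B (the rewrite author's own statement) =====
-- stated objective: alternative
-- what changed: B extracts all matching models in one comprehension (duplicates kept), sorts that full list, and deduplicates with a single adjacent-comparison pass against the last appended element, instead of A's insertion-order seen-set dedup followed by sorting the distinct list.
import Mathlib
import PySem

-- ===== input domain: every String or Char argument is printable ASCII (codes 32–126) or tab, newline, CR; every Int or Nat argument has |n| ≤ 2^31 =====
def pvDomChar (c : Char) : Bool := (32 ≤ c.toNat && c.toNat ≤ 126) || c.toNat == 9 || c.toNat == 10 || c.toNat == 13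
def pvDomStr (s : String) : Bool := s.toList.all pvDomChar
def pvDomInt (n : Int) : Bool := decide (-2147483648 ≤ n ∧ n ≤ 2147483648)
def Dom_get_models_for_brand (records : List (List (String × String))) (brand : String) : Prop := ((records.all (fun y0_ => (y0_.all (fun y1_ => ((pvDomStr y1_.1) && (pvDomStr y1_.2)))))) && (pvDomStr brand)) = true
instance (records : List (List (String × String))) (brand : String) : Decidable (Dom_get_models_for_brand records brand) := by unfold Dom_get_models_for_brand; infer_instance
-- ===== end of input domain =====

-- B extracts all matching models (duplicates kept), sorts the full list and adjacent-deduplicates it,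
-- instead of A's insertion-order seen-set dedup followed by sorting (alternative decomposition, same results).

-- ===== PORT A =====
-- A's loop body: one record step keeping (seen, result); a missing key is Python's KeyError = none (excluded by Pre_).
def pvStepA (brand : String) (st : Option (PySem.Set String × List String)) (r : List (String × String)) : Option (PySem.Set String × List String) :=
  match st with
  | none => none
  | some (seen, result) =>
    match (PySem.Dict.mk r).get? "vehicle_brand" with
    | none => none            -- KeyError
    | some bv =>
      if PySem.Str.lower bv = PySem.Str.lower brand then
        match (PySem.Dict.mk r).get? "vehicle_model" with
        | none => none        -- KeyError
        | some mv =>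
          if mv ∉ seen then some (PySem.Set.add seen mv, result ++ [mv])
          else some (seen, result)
      else some (seen, result)

def get_models_for_brand (records : List (List (String × String))) (brand : String) : List String :=
  match records.foldl (pvStepA brand) (some (PySem.Set.empty, [])) with
  | some (_, result) => PySem.List.sorted result (fun x => x) false
  | none => []

-- ===== PORT B =====
-- B's comprehension filter/extraction for one record; a record missing a key yields none here
-- (in Python that comprehension raises KeyError — such inputs are excluded by Pre_, so this is exact on Pre_).
def pvExtract (brand : String) (r : List (String × String)) : Option String :=
  match (PySem.Dict.mk r).get? "vehicle_brand" with
  | none => none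
  | some bv =>
    if PySem.Str.lower bv = PySem.Str.lower brand then (PySem.Dict.mk r).get? "vehicle_model"
    else none

-- B's dedup loop body: 'if not out or out[-1] != m: out.append(m)'
def pvDedupStep (out : List String) (m : String) : List String :=
  if out.getLast? = some m then out else out ++ [m]

def get_models_for_brand_alt (records : List (List (String × String))) (brand : String) : List String :=
  (PySem.List.sorted (records.filterMap (pvExtract brand)) (fun x => x) false).foldl pvDedupStep []

-- ===== PRECONDITION & SPEC =====
-- Pre_ excludes exactly Python's KeyError inputs: a record without a "vehicle_brand" key, or a
-- record whose brand matches (case-insensitively) but which has no "vehicle_model" key.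
def Pre_get_models_for_brand (records : List (List (String × String))) (brand : String) : Prop :=
  ∀ r ∈ records,
    ((PySem.Dict.mk r).get? "vehicle_brand").isSome = true ∧
    (((PySem.Dict.mk r).get? "vehicle_brand").all (fun bv =>
      !(decide (PySem.Str.lower bv = PySem.Str.lower brand)) ||
        ((PySem.Dict.mk r).get? "vehicle_model").isSome)) = true
instance (records : List (List (String × String))) (brand : String) : Decidable (Pre_get_models_for_brand records brand) := by unfold Pre_get_models_for_brand; infer_instance

def pvWitness_get_models_for_brand : (List (List (String × String))) × String :=
  ([[("vehicle_brand", "Honda"), ("vehicle_model", "CB")], [("vehicle_brand", "TVS")]], "honda")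

def Spec_get_models_for_brand (records : List (List (String × String))) (brand : String) (out : List String) : Prop := out = get_models_for_brand_alt records brand
instance (records : List (List (String × String))) (brand : String) (out : List String) : Decidable (Spec_get_models_for_brand records brand out) := by unfold Spec_get_models_for_brand; infer_instance

-- ===== CLAIM (what is proved, stated in full; the proofs are below) =====
def Claim_equal_get_models_for_brand : Prop := ∀ (records : List (List (String × String))) (brand : String), Dom_get_models_for_brand records brand → Pre_get_models_for_brand records brand → Spec_get_models_for_brand records brand (get_models_for_brand records brand)

-- ===== LEMMAS AND PROOFS =====

-- recursive characterisation of B's adjacent-dedup pass, for the proofs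
def pvDDAux (prev : String) : List String → List String
  | [] => []
  | y :: ys => if y = prev then pvDDAux prev ys else y :: pvDDAux y ys

def pvAdj : List String → List String
  | [] => []
  | x :: xs => x :: pvDDAux x xs

lemma pvFoldl_dedup (l : List String) : ∀ (acc : List String) (prev : String),
    acc.getLast? = some prev → l.foldl pvDedupStep acc = acc ++ pvDDAux prev l := by
  induction l with
  | nil => intro acc prev _; simp [pvDDAux]
  | cons y ys ih =>
    intro acc prev hlast
    rw [List.foldl_cons]
    by_cases h : y = prev
    · subst h
      have hstep : pvDedupStep acc y = acc := by simp [pvDedupStep, hlast]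
      rw [hstep, ih acc y hlast]
      simp [pvDDAux]
    · have hstep : pvDedupStep acc y = acc ++ [y] := by
        simp [pvDedupStep, hlast, Ne.symm h]
      rw [hstep, ih (acc ++ [y]) y (by simp)]
      simp [pvDDAux, h]

lemma pvFoldl_adj (l : List String) : l.foldl pvDedupStep [] = pvAdj l := by
  cases l with
  | nil => simp [pvAdj]
  | cons x xs =>
    rw [List.foldl_cons]
    have hstep : pvDedupStep [] x = [x] := by simp [pvDedupStep]
    rw [hstep, pvFoldl_dedup xs [x] x (by simp)]
    simp [pvAdj]

lemma pvMem_of_mem_dd {x prev : String} {l : List String} (h : x ∈ pvDDAux prev l) : x ∈ l := by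
  induction l generalizing prev with
  | nil => simp [pvDDAux] at h
  | cons y ys ih =>
    simp only [pvDDAux] at h
    split at h
    · exact List.mem_cons_of_mem _ (ih h)
    · rcases List.mem_cons.1 h with h | h
      · exact h ▸ List.mem_cons_self
      · exact List.mem_cons_of_mem _ (ih h)

lemma pvMem_dd_of_mem {x prev : String} {l : List String} (hx : x ∈ l) (hne : x ≠ prev) :
    x ∈ pvDDAux prev l := by
  induction l generalizing prev with
  | nil => simp at hx
  | cons y ys ih =>
    simp only [pvDDAux]
    rcases List.mem_cons.1 hx with h | h
    · subst h
      simp [hne]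
    · split
      · exact ih h hne
      · by_cases hxy : x = y
        · exact hxy ▸ List.mem_cons_self
        · exact List.mem_cons_of_mem _ (ih h hxy)

lemma pvMem_adj {x : String} {l : List String} : x ∈ pvAdj l ↔ x ∈ l := by
  cases l with
  | nil => simp [pvAdj]
  | cons y ys =>
    simp only [pvAdj, List.mem_cons]
    constructor
    · rintro (h | h)
      · exact Or.inl h
      · exact Or.inr (pvMem_of_mem_dd h)
    · rintro (h | h)
      · exact Or.inl h
      · by_cases hxy : x = y
        · exact Or.inl hxy
        · exact Or.inr (pvMem_dd_of_mem h hxy)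

lemma pvDD_pairwise {prev : String} {l : List String}
    (hp : l.Pairwise (· ≤ ·)) (hge : ∀ y ∈ l, prev ≤ y) :
    (pvDDAux prev l).Pairwise (· < ·) ∧ ∀ z ∈ pvDDAux prev l, prev < z := by
  induction l generalizing prev with
  | nil => simp [pvDDAux]
  | cons y ys ih =>
    rcases List.pairwise_cons.1 hp with ⟨hy, hys⟩
    simp only [pvDDAux]
    split
    · rename_i h
      subst h
      exact ih hys hy
    · rename_i h
      have hylt : prev < y := lt_of_le_of_ne (hge y List.mem_cons_self) (Ne.symm h)
      obtain ⟨h1, h2⟩ := ih hys hy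
      refine ⟨List.pairwise_cons.2 ⟨fun z hz => h2 z hz, h1⟩, ?_⟩
      intro z hz
      rcases List.mem_cons.1 hz with hz | hz
      · exact hz ▸ hylt
      · exact lt_trans hylt (h2 z hz)

lemma pvAdj_pairwise {l : List String} (hp : l.Pairwise (· ≤ ·)) :
    (pvAdj l).Pairwise (· < ·) := by
  cases l with
  | nil => simp [pvAdj]
  | cons y ys =>
    rcases List.pairwise_cons.1 hp with ⟨hy, hys⟩
    obtain ⟨h1, h2⟩ := pvDD_pairwise (prev := y) hys hy
    exact List.pairwise_cons.2 ⟨fun z hz => h2 z hz, h1⟩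

-- A's record loop, linked to B's extraction: A's (seen, result) state is the running Set.add fold
-- of the matching-model list B extracts (both components equal).
lemma pvLinkA (brand : String) : ∀ (records : List (List (String × String))),
    Pre_get_models_for_brand records brand →
    ∀ (s : List String),
    records.foldl (pvStepA brand) (some (s, s))
      = some ((records.filterMap (pvExtract brand)).foldl PySem.Set.add s,
              (records.filterMap (pvExtract brand)).foldl PySem.Set.add s) := by
  intro records
  induction records with
  | nil => intro _ s; simp
  | cons r rs ih =>
    intro hpre s
    obtain ⟨hb, hm⟩ := hpre r List.mem_cons_self
    have hpre' : Pre_get_models_for_brand rs brand :=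
      fun r' hr' => hpre r' (List.mem_cons_of_mem _ hr')
    obtain ⟨bv, hbv⟩ := Option.isSome_iff_exists.1 hb
    rw [List.foldl_cons]
    by_cases hmatch : PySem.Str.lower bv = PySem.Str.lower brand
    · have hms : ((PySem.Dict.mk r).get? "vehicle_model").isSome = true := by
        rw [hbv] at hm
        simpa [hmatch] using hm
      obtain ⟨mv, hmv⟩ := Option.isSome_iff_exists.1 hms
      have hex : pvExtract brand r = some mv := by simp [pvExtract, hbv, hmatch, hmv]
      have hsA : pvStepA brand (some (s, s)) r = some (PySem.Set.add s mv, PySem.Set.add s mv) := by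
        by_cases hmem : mv ∈ s
        · simp [pvStepA, hbv, hmatch, hmv, hmem]
        · simp [pvStepA, hbv, hmatch, hmv, hmem]
      rw [hsA, ih hpre' (PySem.Set.add s mv)]
      simp [hex]
    · have hex : pvExtract brand r = none := by simp [pvExtract, hbv, hmatch]
      have hsA : pvStepA brand (some (s, s)) r = some (s, s) := by simp [pvStepA, hbv, hmatch]
      rw [hsA, ih hpre' s]
      simp [hex]

-- ===== VERDICT (by name: the statement is the Claim_ definition above) =====
theorem get_models_for_brand_spec : Claim_equal_get_models_for_brand := by
  intro records brand _ hpre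
  unfold Spec_get_models_for_brand get_models_for_brand get_models_for_brand_alt
  set m := records.filterMap (pvExtract brand) with hm
  have hA' : records.foldl (pvStepA brand) (some (PySem.Set.empty, [])) =
      some (m.foldl PySem.Set.add [], m.foldl PySem.Set.add []) := pvLinkA brand records hpre []
  rw [hA']
  rw [pvFoldl_adj]
  have hfold : m.foldl PySem.Set.add ([] : List String) = PySem.Set.ofList m :=
    (PySem.Set.ofList_eq_foldl m).symm
  rw [hfold]
  have hsortedp : (PySem.List.sorted m (fun x => x) false).Pairwise (· ≤ ·) := by
    have := PySem.List.sorted_pairwise (xs := m) (key := fun x : String => x)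
    simpa using this
  have hadjlt : (pvAdj (PySem.List.sorted m (fun x => x) false)).Pairwise (· < ·) :=
    pvAdj_pairwise hsortedp
  have hnd1 : (pvAdj (PySem.List.sorted m (fun x => x) false)).Nodup :=
    hadjlt.imp (fun h => ne_of_lt h)
  have hnd2 : (PySem.Set.ofList m).Nodup := PySem.Set.nodup_ofList m
  have hperm : (pvAdj (PySem.List.sorted m (fun x => x) false)).Perm (PySem.Set.ofList m) := by
    rw [List.perm_ext_iff_of_nodup hnd1 hnd2]
    intro a
    simp [pvMem_adj, PySem.List.mem_sorted, PySem.Set.mem_ofList]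
  exact PySem.List.sorted_eq_of_perm_of_pairwise_lt _ _ _ hperm hadjlt
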